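-- pv_equiv track=rewrite | github.com/poflygogo/randomshit | 01zerojudge/01 基礎題庫/series_n/n763 我愛偶數 (之偶數殺手)/v2.py | odd_killer
-- ===== SOURCE A (Python) =====
-- from collections import deque
--
-- def odd_killer(num_list):
--     queue = deque(num_list)
--     while len(queue) > 1:
--         num = queue.popleft()
--         if num % 2 == 0:
--             queue.popleft()
--         queue.append(num)
--     return queue[0]
-- ===== SOURCE B (Python) =====
-- from collections import deque
--
-- # Alternative algorithm: compress runs of odd survivors into counts attached to
-- # the preceding even "killer"; each loop iteration removes one alive element.
-- def odd_killer(num_list):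
--     if len(num_list) == 1:
--         return num_list[0]
--     pairs = deque()          # (even value, number of odd survivors right after it)
--     cnt = 0
--     for x in reversed(num_list):
--         if x % 2 == 0:
--             pairs.appendleft([x, cnt])
--             cnt = 0
--         else:
--             cnt += 1
--     pairs[-1][1] += cnt      # odds before the first even wrap to the last even
--     alive = len(num_list)
--     while alive > 1:
--         e, g = pairs.popleft()
--         if g > 0:
--             pairs.append([e, g - 1])   # the even kills the odd right after it
--         else:
--             f, gf = pairs.popleft()    # the even kills the next even
--             pairs.append([e, gf])
--         alive -= 1
--     return pairs[0][0]
-- ===== Notes on version B (the rewrite author's own statement) =====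
-- stated objective: alternative
-- what changed: B replaces A's one-element-per-iteration deque rotation by a game on (even, following-odd-run-length) pairs: runs of odd survivors are compressed into counters attached to the preceding even killer, so odds are never rotated individually.
import Mathlib
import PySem

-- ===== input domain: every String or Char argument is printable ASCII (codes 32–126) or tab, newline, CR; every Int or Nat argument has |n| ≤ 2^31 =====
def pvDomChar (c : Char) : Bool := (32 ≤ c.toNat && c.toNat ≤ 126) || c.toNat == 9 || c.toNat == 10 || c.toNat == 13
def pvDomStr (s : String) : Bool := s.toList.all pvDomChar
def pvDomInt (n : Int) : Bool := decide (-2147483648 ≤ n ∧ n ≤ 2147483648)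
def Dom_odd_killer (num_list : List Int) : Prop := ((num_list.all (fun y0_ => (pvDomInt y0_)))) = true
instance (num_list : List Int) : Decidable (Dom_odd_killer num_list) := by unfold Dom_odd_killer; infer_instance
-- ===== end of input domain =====

-- B plays the elimination game on (even, following-odd-run-length) pairs instead of
-- rotating the queue one element at a time: an alternative algorithm that never
-- rotates the odd survivors individually.

-- ===== PORT A =====
-- A's while-loop is ported with a fuel counter ((n+1)^2 is enough, proved below);
-- Python raises IndexError on [] and loops forever on all-odd lists of length ≥ 2 (excluded by Pre_).
def aLoop : Nat → List Int → List Int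
  | 0, q => q
  | fuel + 1, q =>
    if q.length ≤ 1 then q
    else
      match q with
      | [] => []
      | num :: rest =>
        if num % 2 = 0 then aLoop fuel (rest.tail ++ [num])  -- second popleft, then append num
        else aLoop fuel (rest ++ [num])

def odd_killer (num_list : List Int) : Int :=
  (aLoop ((num_list.length + 1) * (num_list.length + 1)) num_list).headD 0

-- ===== PORT B =====
-- build loop of Source B: iterate reversed(num_list), appendleft pairs, count odd run
def bRuns : List Int → Nat × List (Int × Nat)
  | [] => (0, [])
  | x :: xs =>
    let cp := bRuns xs
    if x % 2 = 0 then (0, (x, cp.1) :: cp.2) else (cp.1 + 1, cp.2)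

-- 'pairs[-1][1] += cnt'
def bAddLast : List (Int × Nat) → Nat → List (Int × Nat)
  | [], _ => []
  | [(e, g)], c => [(e, g + c)]
  | p :: ps, c => p :: bAddLast ps c

-- 'while alive > 1': recursion on the alive counter, which drops by 1 each iteration
def bLoop : Nat → List (Int × Nat) → List (Int × Nat)
  | 0, ps => ps
  | 1, ps => ps
  | alive + 2, ps =>
    match ps with
    | [] => []
    | (e, g) :: rest =>
      if g > 0 then bLoop (alive + 1) (rest ++ [(e, g - 1)])
      else
        match rest with
        | [] => []
        | (_, gf) :: rest' => bLoop (alive + 1) (rest' ++ [(e, gf)])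

def odd_killer_alt (num_list : List Int) : Int :=
  if num_list.length = 1 then num_list.headD 0
  else
    let cp := bRuns num_list
    let pairs := bAddLast cp.2 cp.1
    ((bLoop num_list.length pairs).headD (0, 0)).1

-- ===== PRECONDITION & SPEC =====
-- Pre_ excludes the empty list, on which A raises IndexError, and lists of length ≥ 2
-- whose elements are all odd, on which A's while-loop never terminates.
def Pre_odd_killer (num_list : List Int) : Prop :=
  num_list ≠ [] ∧ (num_list.length = 1 ∨ ∃ x ∈ num_list, x % 2 = 0)
instance (num_list : List Int) : Decidable (Pre_odd_killer num_list) := by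
  unfold Pre_odd_killer; infer_instance

def pvWitness_odd_killer : List Int := [1, 2, 3]

def Spec_odd_killer (num_list : List Int) (out : Int) : Prop := out = odd_killer_alt num_list
instance (num_list : List Int) (out : Int) : Decidable (Spec_odd_killer num_list out) := by
  unfold Spec_odd_killer; infer_instance

-- ===== CLAIM (what is proved, stated in full; the proofs are below) =====
def Claim_equal_odd_killer : Prop := ∀ (num_list : List Int), Dom_odd_killer num_list → Pre_odd_killer num_list → Spec_odd_killer num_list (odd_killer num_list)

-- ===== LEMMAS AND PROOFS =====

-- abstraction: the pair list B plays on, seen as a function of A's queue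
def pvAbs (q : List Int) : List (Int × Nat) := bAddLast (bRuns q).2 (bRuns q).1

-- index of the first even element (A rotates this many times before the next kill)
def pvIdx : List Int → Nat
  | [] => 0
  | x :: xs => if x % 2 = 0 then 0 else pvIdx xs + 1

-- termination measure for A's loop: strictly decreases at each iteration
def pvM (q : List Int) : Nat := q.length * q.length + pvIdx q

theorem bAddLast_cons_cons (p q : Int × Nat) (qs : List (Int × Nat)) (c : Nat) :
    bAddLast (p :: q :: qs) c = p :: bAddLast (q :: qs) c := rfl

theorem bAddLast_ne_nil (p : Int × Nat) (ps : List (Int × Nat)) (c : Nat) :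
    bAddLast (p :: ps) c ≠ [] := by
  cases ps with
  | nil => cases p; simp [bAddLast]
  | cons q qs => simp [bAddLast_cons_cons]

theorem bAddLast_cons (p : Int × Nat) (ps : List (Int × Nat)) (c : Nat) (h : ps ≠ []) :
    bAddLast (p :: ps) c = p :: bAddLast ps c := by
  cases ps with
  | nil => exact absurd rfl h
  | cons q qs => rfl

theorem addLast_zero (ps : List (Int × Nat)) : bAddLast ps 0 = ps := by
  induction ps with
  | nil => rfl
  | cons p ps ih =>
    cases ps with
    | nil => cases p; simp [bAddLast]
    | cons q qs => rw [bAddLast_cons_cons, ih]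

theorem addLast_add (ps : List (Int × Nat)) (a b : Nat) :
    bAddLast (bAddLast ps a) b = bAddLast ps (a + b) := by
  induction ps with
  | nil => rfl
  | cons p ps ih =>
    cases ps with
    | nil => cases p; simp [bAddLast, Nat.add_assoc]
    | cons q qs =>
      rw [bAddLast_cons_cons, bAddLast_cons p _ b (bAddLast_ne_nil q qs a),
        bAddLast_cons_cons, ih]

theorem addLast_concat (ps : List (Int × Nat)) (e : Int) (g c : Nat) :
    bAddLast (ps ++ [(e, g)]) c = ps ++ [(e, g + c)] := by
  induction ps with
  | nil => rfl
  | cons p ps ih =>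
    cases ps with
    | nil => simp [bAddLast]
    | cons q qs => simp only [List.cons_append, bAddLast_cons_cons] at *; rw [ih]

theorem runs_nil_iff (l : List Int) : (bRuns l).2 = [] ↔ ∀ x ∈ l, ¬ x % 2 = 0 := by
  induction l with
  | nil => simp [bRuns]
  | cons x xs ih =>
    by_cases hx : x % 2 = 0 <;> simp only [bRuns, hx, if_pos, if_true, if_false, if_neg,
      List.mem_cons, not_false_eq_true]
    · constructor
      · intro h; simp at h
      · intro h; exact absurd hx (h x (Or.inl rfl))
    · constructor
      · intro h y hy
        rcases hy with hy | hy
        · subst hy; exact hx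
        · exact ih.1 h y hy
      · intro h; exact ih.2 fun y hy => h y (Or.inr hy)

theorem runs_concat_even (l : List Int) (x : Int) (hx : x % 2 = 0) :
    bRuns (l ++ [x]) = ((bRuns l).1, (bRuns l).2 ++ [(x, 0)]) := by
  induction l with
  | nil => simp [bRuns, hx]
  | cons y ys ih =>
    by_cases hy : y % 2 = 0 <;> simp [bRuns, hy, ih]

theorem runs_concat_odd_nil (l : List Int) (x : Int) (hx : ¬ x % 2 = 0)
    (h : (bRuns l).2 = []) :
    bRuns (l ++ [x]) = ((bRuns l).1 + 1, []) := by
  induction l with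
  | nil => simp [bRuns, hx]
  | cons y ys ih =>
    by_cases hy : y % 2 = 0
    · exact absurd h (by simp [bRuns, hy])
    · have h2 : (bRuns ys).2 = [] := by simpa [bRuns, hy] using h
      simp [bRuns, hy, ih h2]

theorem runs_concat_odd (l : List Int) (x : Int) (hx : ¬ x % 2 = 0)
    (hne : (bRuns l).2 ≠ []) :
    bRuns (l ++ [x]) = ((bRuns l).1, bAddLast (bRuns l).2 1) := by
  induction l with
  | nil => exact absurd rfl hne
  | cons y ys ih =>
    by_cases hy : y % 2 = 0
    · by_cases h2 : (bRuns ys).2 = []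
      · simp [bRuns, hy, runs_concat_odd_nil ys x hx h2, h2, bAddLast]
      · simp [bRuns, hy, ih h2, bAddLast_cons _ _ _ h2]
    · have hne2 : (bRuns ys).2 ≠ [] := by simpa [bRuns, hy] using hne
      simp [bRuns, hy, ih hne2]

theorem abs_cons_even (e : Int) (l : List Int) (he : e % 2 = 0) :
    pvAbs (e :: l) = (e, (bRuns l).1) :: (bRuns l).2 := by
  unfold pvAbs
  rw [show bRuns (e :: l) = (0, (e, (bRuns l).1) :: (bRuns l).2) from by simp [bRuns, he]]
  exact addLast_zero _

theorem abs_concat_even (l : List Int) (e : Int) (he : e % 2 = 0) :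
    pvAbs (l ++ [e]) = (bRuns l).2 ++ [(e, (bRuns l).1)] := by
  unfold pvAbs
  rw [runs_concat_even l e he]
  simpa using addLast_concat (bRuns l).2 e 0 (bRuns l).1

theorem abs_rotate (o : Int) (l : List Int) (ho : ¬ o % 2 = 0)
    (hne : (bRuns l).2 ≠ []) : pvAbs (l ++ [o]) = pvAbs (o :: l) := by
  unfold pvAbs
  rw [runs_concat_odd l o ho hne,
    show bRuns (o :: l) = ((bRuns l).1 + 1, (bRuns l).2) from by simp [bRuns, ho]]
  simp [addLast_add, Nat.add_comm]

theorem pvIdx_append_left (l l' : List Int) (h : ∃ x ∈ l, x % 2 = 0) :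
    pvIdx (l ++ l') = pvIdx l := by
  induction l with
  | nil => simp at h
  | cons x xs ih =>
    by_cases hx : x % 2 = 0
    · simp [pvIdx, hx]
    · have h' : ∃ y ∈ xs, y % 2 = 0 := by
        obtain ⟨y, hy, hye⟩ := h
        rcases List.mem_cons.1 hy with rfl | hm
        · exact absurd hye hx
        · exact ⟨y, hm, hye⟩
      simp [pvIdx, hx, ih h']

theorem pvIdx_lt_length (l : List Int) (h : ∃ x ∈ l, x % 2 = 0) :
    pvIdx l < l.length := by
  induction l with
  | nil => simp at h
  | cons x xs ih =>
    by_cases hx : x % 2 = 0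
    · simp [pvIdx, hx]
    · have h' : ∃ y ∈ xs, y % 2 = 0 := by
        obtain ⟨y, hy, hye⟩ := h
        rcases List.mem_cons.1 hy with rfl | hm
        · exact absurd hye hx
        · exact ⟨y, hm, hye⟩
      have := ih h'
      rw [show pvIdx (x :: xs) = pvIdx xs + 1 from by simp [pvIdx, hx]]
      simp only [List.length_cons]
      omega

-- the main simulation lemma: A's fuelled loop and B's pair game produce the same survivor
theorem pvMain : ∀ (fuel : Nat) (q : List Int), (∃ x ∈ q, x % 2 = 0) → pvM q ≤ fuel →
    (aLoop fuel q).headD 0 = ((bLoop q.length (pvAbs q)).headD (0, 0)).1 := by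
  intro fuel
  induction fuel with
  | zero =>
    intro q hE hM
    exfalso
    obtain ⟨x, hx, _⟩ := hE
    have h1 : 1 ≤ q.length := List.length_pos_iff.2 (List.ne_nil_of_mem hx)
    have h2 : 1 ≤ q.length * q.length := Nat.one_le_iff_ne_zero.2 (by positivity)
    simp only [pvM, Nat.le_zero] at hM
    omega
  | succ fuel ih =>
    intro q hE hM
    by_cases hlen : q.length ≤ 1
    · -- single element, necessarily the even one
      obtain ⟨x, hx, hxe⟩ := hE
      have h1 : q.length = 1 := by
        have := List.length_pos_iff.2 (List.ne_nil_of_mem hx); omega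
      obtain ⟨a, rfl⟩ := List.length_eq_one_iff.1 h1
      have hax : x = a := by simpa using hx
      subst hax
      simp [aLoop, pvAbs, bRuns, hxe, bAddLast, bLoop]
    · -- length ≥ 2
      rw [Nat.not_le] at hlen
      obtain ⟨y, rest, rfl⟩ : ∃ y rest, q = y :: rest := by
        cases q with
        | nil => simp at hlen
        | cons y rest => exact ⟨y, rest, rfl⟩
      have hrest : rest ≠ [] := by
        intro h; subst h; simp at hlen
      by_cases hy : y % 2 = 0
      · -- front even: it kills the next element
        obtain ⟨v, rest', rfl⟩ : ∃ v rest', rest = v :: rest' := by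
          cases rest with
          | nil => exact absurd rfl hrest
          | cons v rest' => exact ⟨v, rest', rfl⟩
        have hEq' : (∃ x ∈ rest' ++ [y], x % 2 = 0) := ⟨y, by simp, hy⟩
        have hM' : pvM (rest' ++ [y]) ≤ fuel := by
          have hidx : pvIdx (rest' ++ [y]) < rest'.length + 1 := by
            have := pvIdx_lt_length (rest' ++ [y]) hEq'
            simpa using this
          simp only [pvM, List.length_cons, List.length_append, List.length_nil] at hM ⊢
          nlinarith [hM, hidx]
        have hrec := ih (rest' ++ [y]) hEq' hM'
        have hstep : aLoop (fuel + 1) (y :: v :: rest') = aLoop fuel (rest' ++ [y]) := by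
          simp [aLoop, hy]
        rw [hstep, hrec, abs_concat_even rest' y hy]
        have hlenq : (rest' ++ [y]).length = rest'.length + 1 := by simp
        -- now relate the B-side step
        by_cases hv : v % 2 = 0
        · -- the victim is the next even: merge its gap
          have habs : pvAbs (y :: v :: rest') =
              (y, 0) :: (v, (bRuns rest').1) :: (bRuns rest').2 := by
            rw [abs_cons_even y (v :: rest') hy]
            simp [bRuns, hv]
          have hb : bLoop (rest'.length + 2) ((y, 0) :: (v, (bRuns rest').1) :: (bRuns rest').2)
              = bLoop (rest'.length + 1) ((bRuns rest').2 ++ [(y, (bRuns rest').1)]) := by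
            simp [bLoop]
          rw [habs, show (y :: v :: rest').length = rest'.length + 2 from by simp, hb, hlenq]
        · -- the victim is an odd in y's run: decrement the gap
          have habs : pvAbs (y :: v :: rest') =
              (y, (bRuns rest').1 + 1) :: (bRuns rest').2 := by
            rw [abs_cons_even y (v :: rest') hy]
            simp [bRuns, hv]
          have hb : bLoop (rest'.length + 2) ((y, (bRuns rest').1 + 1) :: (bRuns rest').2)
              = bLoop (rest'.length + 1) ((bRuns rest').2 ++ [(y, (bRuns rest').1)]) := by
            simp [bLoop]
          rw [habs, show (y :: v :: rest').length = rest'.length + 2 from by simp, hb, hlenq]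
      · -- front odd: rotate it to the back
        have hErest : ∃ x ∈ rest, x % 2 = 0 := by
          obtain ⟨x, hx, hxe⟩ := hE
          rcases List.mem_cons.1 hx with rfl | hm
          · exact absurd hxe hy
          · exact ⟨x, hm, hxe⟩
        have hne2 : (bRuns rest).2 ≠ [] := by
          intro h
          obtain ⟨x, hx, hxe⟩ := hErest
          exact (runs_nil_iff rest).1 h x hx hxe
        have hEq' : ∃ x ∈ rest ++ [y], x % 2 = 0 := by
          obtain ⟨x, hx, hxe⟩ := hErest
          exact ⟨x, by simp [hx], hxe⟩
        have hM' : pvM (rest ++ [y]) ≤ fuel := by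
          have h1 : pvIdx (rest ++ [y]) = pvIdx rest := pvIdx_append_left rest [y] hErest
          have h2 : pvIdx (y :: rest) = pvIdx rest + 1 := by simp [pvIdx, hy]
          have hL : (rest ++ [y]).length = (y :: rest).length := by simp
          have hkey : pvM (rest ++ [y]) + 1 = pvM (y :: rest) := by
            unfold pvM; rw [hL, h1, h2]; omega
          omega
        have hrec := ih (rest ++ [y]) hEq' hM'
        have hstep : aLoop (fuel + 1) (y :: rest) = aLoop fuel (rest ++ [y]) := by
          have hl2 : ¬ (y :: rest).length ≤ 1 := Nat.not_le.mpr hlen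
          simp [aLoop, hy, hl2]
          intro h
          exact absurd h hrest
        rw [hstep, hrec, abs_rotate y rest hy hne2]
        rw [show (rest ++ [y]).length = (y :: rest).length from by simp]

-- ===== VERDICT (by name: the statement is the Claim_ definition above) =====
theorem odd_killer_spec : Claim_equal_odd_killer := by
  intro num_list _ hPre
  obtain ⟨hne, hdisj⟩ := hPre
  unfold Spec_odd_killer
  by_cases h1 : num_list.length = 1
  · obtain ⟨a, rfl⟩ := List.length_eq_one_iff.1 h1
    simp [odd_killer, odd_killer_alt, aLoop]
  · have hE : ∃ x ∈ num_list, x % 2 = 0 := by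
      rcases hdisj with h | h
      · exact absurd h h1
      · exact h
    have hM : pvM num_list ≤ (num_list.length + 1) * (num_list.length + 1) := by
      have hidx := pvIdx_lt_length num_list hE
      simp only [pvM]
      nlinarith [hidx]
    have hmain := pvMain ((num_list.length + 1) * (num_list.length + 1)) num_list hE hM
    simp only [odd_killer, odd_killer_alt, if_neg h1]
    exact hmain
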